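-- pv_equiv track=rewrite | github.com/sony-jun/01-ALGORITHM | 1회차/이대찬/20220725/2_두개뽑아서더하기.py | solution
-- ===== SOURCE A (Python) =====
-- def solution(numbers):
--     answer = []
--     for i in range(0, len(numbers)):
--         a=i
--         while(a<len(numbers)-1):
--             a += 1
--             if numbers[i]+numbers[a] not in answer:
--                 answer.append(numbers[i]+numbers[a])
--     answer.sort()
--     return answer
-- ===== SOURCE B (Python) =====
-- def solution(numbers):
--     cnt = {}
--     for v in numbers:
--         cnt[v] = cnt.get(v, 0) + 1
--     sums = set()
--     rest = list(cnt)
--     while rest: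
--         v = rest.pop(0)
--         if cnt[v] >= 2:
--             sums.add(v + v)
--         for w in rest:
--             sums.add(v + w)
--     return sorted(sums)
-- ===== Notes on version B (the rewrite author's own statement) =====
-- stated objective: faster
-- what changed: B replaces the quadratic scan over raw index pairs with a linear-membership list ('not in answer') by a counting pass: it builds a value->count dict, then enumerates unordered pairs of DISTINCT values (adding v+v only when a value occurs at least twice), collecting results in a set and returning sorted(set).
import Mathlib
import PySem

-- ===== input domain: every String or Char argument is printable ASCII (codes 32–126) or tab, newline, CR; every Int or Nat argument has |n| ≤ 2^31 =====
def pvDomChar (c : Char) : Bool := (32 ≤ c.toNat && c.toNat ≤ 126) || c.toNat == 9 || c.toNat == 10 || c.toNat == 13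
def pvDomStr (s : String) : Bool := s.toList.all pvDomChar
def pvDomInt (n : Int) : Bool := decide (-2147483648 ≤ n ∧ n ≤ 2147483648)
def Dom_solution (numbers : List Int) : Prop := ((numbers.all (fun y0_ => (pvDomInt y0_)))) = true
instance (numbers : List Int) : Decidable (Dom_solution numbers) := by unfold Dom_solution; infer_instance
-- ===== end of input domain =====

-- B iterates over distinct values with their counts instead of A's raw index pairs with a list-membership scan; measurably faster.

-- ===== PORT A =====
-- inner 'while a < len(numbers)-1' loop of A; indices i and a+1 are always in range, so pyGetD is exact
def solInner (numbers : List Int) (i : Int) (a : Int) (answer : List Int) : List Int :=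
  if a < (PySem.List.len numbers) - 1 then
    let s := PySem.List.pyGetD numbers i 0 + PySem.List.pyGetD numbers (a + 1) 0
    solInner numbers i (a + 1) (if s ∈ answer then answer else answer ++ [s])
  else answer
termination_by ((PySem.List.len numbers) - 1 - a).toNat
decreasing_by simp only [PySem.List.len_eq] at *; omega

def solution (numbers : List Int) : List Int :=
  let answer := (PySem.List.pyRange 0 (PySem.List.len numbers) 1).foldl
    (fun ans i => solInner numbers i i ans) []
  PySem.List.sorted answer (fun x => x) false

-- ===== PORT B =====
-- the 'while rest: v = rest.pop(0); …' loop of B as structural recursion on rest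
def sumLoop (cnt : PySem.Dict Int Int) : List Int → PySem.Set Int → PySem.Set Int
  | [], sums => sums
  | v :: rest, sums =>
    let sums1 := if 2 ≤ cnt.getD v 0 then PySem.Set.add sums (v + v) else sums
    sumLoop cnt rest (rest.foldl (fun s w => PySem.Set.add s (v + w)) sums1)

def solution_alt (numbers : List Int) : List Int :=
  let cnt := numbers.foldl (fun d v => d.insert v (d.getD v 0 + 1)) PySem.Dict.empty
  let sums := sumLoop cnt (PySem.Dict.keys cnt) PySem.Set.empty
  PySem.List.sorted sums (fun x => x) false

-- ===== PRECONDITION & SPEC =====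
def Spec_solution (numbers : List Int) (out : List Int) : Prop := out = solution_alt numbers
instance (numbers : List Int) (out : List Int) : Decidable (Spec_solution numbers out) := by unfold Spec_solution; infer_instance

-- ===== CLAIM (what is proved, stated in full; the proofs are below) =====
def Claim_equal_solution : Prop := ∀ (numbers : List Int), Dom_solution numbers → Spec_solution numbers (solution numbers)

-- ===== LEMMAS AND PROOFS =====

theorem pair_sublist_of_indices (l : List Int) (i j : Nat) (hij : i < j) (hj : j < l.length) :
    List.Sublist [l[i], l[j]] l := by
  induction l generalizing i j with
  | nil => simp at hj
  | cons a t ih =>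
    cases i with
    | zero =>
      cases j with
      | zero => omega
      | succ j' =>
        simp only [List.getElem_cons_zero, List.getElem_cons_succ]
        exact List.Sublist.cons₂ a (List.singleton_sublist.mpr (List.getElem_mem _))
    | succ i' =>
      cases j with
      | zero => omega
      | succ j' =>
        simp only [List.getElem_cons_succ]
        exact List.Sublist.cons a (ih i' j' (by omega) (by simpa using hj))

theorem indices_of_pair_sublist (l : List Int) (p q : Int) (h : List.Sublist [p, q] l) :
    ∃ i j : Nat, ∃ hj : j < l.length, ∃ hi : i < l.length, i < j ∧ l[i] = p ∧ l[j] = q := by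
  induction l with
  | nil => simp at h
  | cons a t ih =>
    rcases List.sublist_cons_iff.mp h with h' | ⟨r, hr, hrs⟩
    · rcases ih h' with ⟨i, j, hj, hi, hij, hp, hq⟩
      exact ⟨i+1, j+1, by simpa using hj, by simpa using hi, by omega, by simpa using hp, by simpa using hq⟩
    · cases hr
      have hq : q ∈ t := List.singleton_sublist.mp hrs
      rcases List.getElem_of_mem hq with ⟨j, hjt, hje⟩
      exact ⟨0, j+1, by simpa using hjt, by simp, by omega, rfl, by simpa using hje⟩

theorem pair_sublist_of_mem_mem (l : List Int) (v w : Int) (hvw : v ≠ w)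
    (hv : v ∈ l) (hw : w ∈ l) : List.Sublist [v, w] l ∨ List.Sublist [w, v] l := by
  induction l with
  | nil => simp at hv
  | cons a t ih =>
    by_cases hav : a = v
    · subst hav
      have hw' : w ∈ t := (List.mem_cons.mp hw).resolve_left (fun h => hvw h.symm)
      exact Or.inl (List.Sublist.cons₂ a (List.singleton_sublist.mpr hw'))
    · by_cases haw : a = w
      · subst haw
        have hv' : v ∈ t := (List.mem_cons.mp hv).resolve_left (fun h => hav h.symm)
        exact Or.inr (List.Sublist.cons₂ a (List.singleton_sublist.mpr hv'))
      · have hv' : v ∈ t := (List.mem_cons.mp hv).resolve_left (fun h => hav h.symm)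
        have hw' : w ∈ t := (List.mem_cons.mp hw).resolve_left (fun h => haw h.symm)
        rcases ih hv' hw' with h | h
        · exact Or.inl (h.cons a)
        · exact Or.inr (h.cons a)

theorem pair_sublist_cons_iff (p q v : Int) (l : List Int) :
    List.Sublist [p, q] (v :: l) ↔ (p = v ∧ q ∈ l) ∨ List.Sublist [p, q] l := by
  constructor
  · intro h
    rcases List.sublist_cons_iff.mp h with h' | ⟨r, hr, hrs⟩
    · exact Or.inr h'
    · cases hr
      exact Or.inl ⟨rfl, List.singleton_sublist.mp hrs⟩
  · rintro (⟨hp, hq⟩ | h)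
    · subst hp
      exact List.Sublist.cons₂ p (List.singleton_sublist.mpr hq)
    · exact h.cons v

theorem mem_solInner (numbers : List Int) (i a : Int) (answer : List Int) (x : Int) :
    x ∈ solInner numbers i a answer ↔
      x ∈ answer ∨ ∃ k : Int, a < k ∧ k < numbers.length ∧
        x = PySem.List.pyGetD numbers i 0 + PySem.List.pyGetD numbers k 0 := by
  fun_induction solInner numbers i a answer with
  | case1 a answer h s ih =>
    simp only [dite_eq_ite] at ih
    rw [ih]
    simp only [PySem.List.len_eq] at h
    constructor
    · rintro (hx | ⟨k, hk1, hk2, hk3⟩)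
      · rcases (by split_ifs at hx with hs <;> simp_all : x ∈ answer ∨ x = s) with hx | hx
        · exact Or.inl hx
        · exact Or.inr ⟨a + 1, by omega, by omega, hx⟩
      · exact Or.inr ⟨k, by omega, hk2, hk3⟩
    · rintro (hx | ⟨k, hk1, hk2, hk3⟩)
      · exact Or.inl (by split_ifs with hs <;> simp_all)
      · by_cases hk : k = a + 1
        · subst hk
          subst hk3
          left
          split_ifs with hs
          · exact hs
          · exact List.mem_append.mpr (Or.inr (List.mem_singleton.mpr rfl))
        · exact Or.inr ⟨k, by omega, hk2, hk3⟩
  | case2 a answer h =>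
    simp only [PySem.List.len_eq] at h
    constructor
    · exact Or.inl
    · rintro (hx | ⟨k, hk1, hk2, hk3⟩)
      · exact hx
      · omega

theorem nodup_solInner (numbers : List Int) (i a : Int) (answer : List Int)
    (h : answer.Nodup) : (solInner numbers i a answer).Nodup := by
  fun_induction solInner numbers i a answer with
  | case1 a answer hlt s ih =>
    apply ih
    split_ifs with hs
    · exact h
    · simpa [List.nodup_append] using ⟨h, fun a ha hae => hs (hae ▸ ha)⟩
  | case2 a answer hlt => exact h

theorem mem_outer (numbers : List Int) (c : Int) (answer : List Int) (x : Int) :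
    x ∈ (PySem.List.pyRange c (numbers.length : Int) 1).foldl
        (fun ans i => solInner numbers i i ans) answer ↔
      x ∈ answer ∨ ∃ i k : Int, c ≤ i ∧ i < k ∧ k < numbers.length ∧
        x = PySem.List.pyGetD numbers i 0 + PySem.List.pyGetD numbers k 0 := by
  by_cases hcn : c < (numbers.length : Int)
  case neg =>
    rw [PySem.List.pyRange_one_eq_nil (by omega)]
    simp only [List.foldl_nil]
    constructor
    · exact Or.inl
    · rintro (hx | ⟨i, k, h1, h2, h3, h4⟩)
      · exact hx
      · omega
  case pos =>
    rw [PySem.List.pyRange_one_cons (by omega), List.foldl_cons]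
    have ih := mem_outer numbers (c + 1) (solInner numbers c c answer) x
    rw [ih, mem_solInner]
    constructor
    · rintro ((hx | ⟨k, hk1, hk2, hk3⟩) | ⟨i, k, h1, h2, h3, h4⟩)
      · exact Or.inl hx
      · exact Or.inr ⟨c, k, le_refl c, hk1, hk2, hk3⟩
      · exact Or.inr ⟨i, k, by omega, h2, h3, h4⟩
    · rintro (hx | ⟨i, k, h1, h2, h3, h4⟩)
      · exact Or.inl (Or.inl hx)
      · by_cases hic : i = c
        · subst hic; exact Or.inl (Or.inr ⟨k, h2, h3, h4⟩)
        · exact Or.inr ⟨i, k, by omega, h2, h3, h4⟩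
termination_by ((numbers.length : Int) - c).toNat
decreasing_by omega

theorem nodup_outer (numbers : List Int) (c : Int) (answer : List Int) (h : answer.Nodup) :
    ((PySem.List.pyRange c (numbers.length : Int) 1).foldl
        (fun ans i => solInner numbers i i ans) answer).Nodup := by
  by_cases hcn : c < (numbers.length : Int)
  case neg =>
    rw [PySem.List.pyRange_one_eq_nil (by omega)]
    simpa using h
  case pos =>
    rw [PySem.List.pyRange_one_cons (by omega), List.foldl_cons]
    exact nodup_outer numbers (c + 1) _ (nodup_solInner numbers c c answer h)
termination_by ((numbers.length : Int) - c).toNat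
decreasing_by omega

theorem mem_A_iff (numbers : List Int) (x : Int) :
    (x ∈ (PySem.List.pyRange 0 (numbers.length : Int) 1).foldl
        (fun ans i => solInner numbers i i ans) []) ↔
      ∃ p q : Int, List.Sublist [p, q] numbers ∧ x = p + q := by
  rw [mem_outer]
  simp only [List.not_mem_nil, false_or]
  constructor
  · rintro ⟨i, k, h1, h2, h3, h4⟩
    have hi := PySem.List.pyGetD_eq_getElem (i := i) numbers 0 (by omega) (by omega)
    have hk := PySem.List.pyGetD_eq_getElem (i := k) numbers 0 (by omega) (by omega)
    exact ⟨numbers[i.toNat], numbers[k.toNat],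
      pair_sublist_of_indices numbers i.toNat k.toNat (by omega) (by omega),
      by rw [h4, hi, hk]⟩
  · rintro ⟨p, q, hsub, hx⟩
    rcases indices_of_pair_sublist numbers p q hsub with ⟨i, j, hj, hi, hij, hp, hq⟩
    refine ⟨(i : Int), (j : Int), by omega, by omega, by omega, ?_⟩
    rw [PySem.List.pyGetD_eq_getElem (i := (i:Int)) numbers 0 (by omega) (by omega),
        PySem.List.pyGetD_eq_getElem (i := (j:Int)) numbers 0 (by omega) (by omega)]
    simp only [Int.toNat_natCast]
    rw [hp, hq, hx]

theorem mem_sumLoop (cnt : PySem.Dict Int Int) (l : List Int) (sums : PySem.Set Int) (x : Int) :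
    x ∈ sumLoop cnt l sums ↔
      x ∈ sums ∨ (∃ v ∈ l, 2 ≤ cnt.getD v 0 ∧ x = v + v) ∨
        ∃ p q : Int, List.Sublist [p, q] l ∧ x = p + q := by
  induction l generalizing sums with
  | nil => simp [sumLoop]
  | cons v rest ih =>
    rw [sumLoop, ih, PySem.Set.mem_foldl_add]
    have hs1 : (x ∈ if 2 ≤ cnt.getD v 0 then PySem.Set.add sums (v + v) else sums) ↔
        x ∈ sums ∨ (2 ≤ cnt.getD v 0 ∧ x = v + v) := by
      split_ifs with hc <;> simp [PySem.Set.mem_add, hc]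
    rw [hs1]
    simp only [List.mem_cons, pair_sublist_cons_iff]
    constructor
    · rintro (((hx | ⟨hc, hx⟩) | ⟨w, hw, hx⟩) | ⟨u, hu, hc, hx⟩ | ⟨p, q, hsub, hx⟩)
      · exact Or.inl hx
      · exact Or.inr (Or.inl ⟨v, Or.inl rfl, hc, hx⟩)
      · exact Or.inr (Or.inr ⟨v, w, Or.inl ⟨rfl, hw⟩, hx⟩)
      · exact Or.inr (Or.inl ⟨u, Or.inr hu, hc, hx⟩)
      · exact Or.inr (Or.inr ⟨p, q, Or.inr hsub, hx⟩)
    · rintro (hx | ⟨u, (hu | hu), hc, hx⟩ | ⟨p, q, (⟨hp, hq⟩ | hsub), hx⟩)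
      · exact Or.inl (Or.inl (Or.inl hx))
      · subst hu; exact Or.inl (Or.inl (Or.inr ⟨hc, hx⟩))
      · exact Or.inr (Or.inl ⟨u, hu, hc, hx⟩)
      · subst hp; exact Or.inl (Or.inr ⟨q, hq, hx⟩)
      · exact Or.inr (Or.inr ⟨p, q, hsub, hx⟩)

theorem nodup_sumLoop (cnt : PySem.Dict Int Int) (l : List Int) (sums : PySem.Set Int)
    (h : sums.Nodup) : (sumLoop cnt l sums).Nodup := by
  induction l generalizing sums with
  | nil => exact h
  | cons v rest ih =>
    rw [sumLoop]
    apply ih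
    rw [← PySem.Set.update_map_eq_foldl_add]
    apply PySem.Set.nodup_update
    split_ifs with hc
    · exact PySem.Set.nodup_add sums (v + v) h
    · exact h

theorem mem_B_iff (numbers : List Int) (x : Int) :
    ((∃ v ∈ PySem.Set.ofList numbers, 2 ≤ (numbers.count v : Int) ∧ x = v + v) ∨
      ∃ p q : Int, List.Sublist [p, q] (PySem.Set.ofList numbers) ∧ x = p + q) ↔
      ∃ p q : Int, List.Sublist [p, q] numbers ∧ x = p + q := by
  constructor
  · rintro (⟨v, hv, hc, hx⟩ | ⟨p, q, hsub, hx⟩)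
    · exact ⟨v, v, List.duplicate_iff_sublist.mp (List.duplicate_iff_two_le_count.mpr (by exact_mod_cast hc)), hx⟩
    · have hnd : ([p, q] : List Int).Nodup := hsub.nodup (PySem.Set.nodup_ofList numbers)
      have hpq : p ≠ q := by simpa using hnd
      have hp : p ∈ numbers := (PySem.Set.mem_ofList numbers _).mp (hsub.subset (by simp))
      have hq : q ∈ numbers := (PySem.Set.mem_ofList numbers _).mp (hsub.subset (by simp))
      rcases pair_sublist_of_mem_mem numbers p q hpq hp hq with h | h
      · exact ⟨p, q, h, hx⟩
      · exact ⟨q, p, h, by omega⟩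
  · rintro ⟨p, q, hsub, hx⟩
    by_cases hpq : p = q
    · subst hpq
      refine Or.inl ⟨p, ?_, ?_, hx⟩
      · exact (PySem.Set.mem_ofList numbers _).mpr (hsub.subset (by simp))
      · exact_mod_cast List.duplicate_iff_two_le_count.mp (List.duplicate_iff_sublist.mpr hsub)
    · have hp : p ∈ PySem.Set.ofList numbers := (PySem.Set.mem_ofList numbers _).mpr (hsub.subset (by simp))
      have hq : q ∈ PySem.Set.ofList numbers := (PySem.Set.mem_ofList numbers _).mpr (hsub.subset (by simp))
      rcases pair_sublist_of_mem_mem (PySem.Set.ofList numbers) p q hpq hp hq with h | h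
      · exact Or.inr ⟨p, q, h, hx⟩
      · exact Or.inr ⟨q, p, h, by omega⟩

-- ===== VERDICT (by name: the statement is the Claim_ definition above) =====
theorem solution_spec : Claim_equal_solution := by
  intro numbers _
  unfold Spec_solution
  simp only [solution, solution_alt, PySem.List.len_eq]
  have hcnt : numbers.foldl (fun d v => d.insert v (d.getD v 0 + 1)) PySem.Dict.empty
      = PySem.Dict.counter numbers := PySem.Dict.foldl_insert_getD_add_one_eq_counter numbers
  rw [hcnt, PySem.Dict.keys_counter]
  apply PySem.List.sorted_eq_sorted_of_perm _ _ _ (fun a b h => h)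
  apply (List.perm_ext_iff_of_nodup ?_ ?_).mpr
  · intro x
    rw [mem_A_iff, mem_sumLoop]
    simp only [PySem.Dict.getD_counter, PySem.Set.empty, List.not_mem_nil, false_or]
    exact (mem_B_iff numbers x).symm
  · exact nodup_outer numbers 0 [] List.nodup_nil
  · exact nodup_sumLoop _ _ _ List.nodup_nil
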